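-- pv_equiv track=rewrite | github.com/newkimjiwon/CodingTest | BAEKJOON/G5/13549번_숨바꼭질 3.py | solution
-- ===== SOURCE A (Python) =====
-- from collections import deque
--
-- def solution(n, k):
--     answer = 0
--
--     # 방문 처리
--     visited = [False] * 100001
--
--     dq = deque([(n, 0)])  # 시작 위치와 몇 번 바뀌는 지 변수를 기입
--
--     while dq:
--         current, time = dq.popleft()
--
--         if current == k:
--             return time
--
--         # 순간이동: 0초 걸리므로 먼저 탐색
--         if 0 <= current * 2 <= 100000 and not visited[current * 2]:
--             visited[current * 2] = True
--             dq.appendleft((current * 2, time))  # 0초 -> 우선 탐색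
--
--         # 걷기: 1초 걸리므로 뒤에 탐색
--         if 0 <= current - 1 <= 100000 and not visited[current - 1]:
--             visited[current - 1] = True
--             dq.append((current - 1, time + 1))
--
--         if 0 <= current + 1 <= 100000 and not visited[current + 1]:
--             visited[current + 1] = True
--             dq.append((current + 1, time + 1))
--
--     # 모든 경우가 없다면
--     return 0
-- ===== SOURCE B (Python) =====
-- def solution(n, k):
--     # Plain level-by-level BFS after contracting the 0-cost doubling edges:
--     # each node's doubling chain is followed by direct recursion, so no deque
--     # and no per-node times are needed; visited is a hash set.
--     visited = set()
--
--     def visit(x, nxt):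
--         # Explore x and its free-doubling chain; collect 1-cost neighbours in nxt.
--         if x == k:
--             return True
--         d = x * 2
--         chain = 0 <= d <= 100000 and d not in visited
--         if chain:
--             visited.add(d)
--         for w in (x - 1, x + 1):
--             if 0 <= w <= 100000 and w not in visited:
--                 visited.add(w)
--                 nxt.append(w)
--         return visit(d, nxt) if chain else False
--
--     level = [n]
--     t = 0
--     while level:
--         nxt = []
--         for x in level:
--             if visit(x, nxt):
--                 return t
--         level, t = nxt, t + 1
--     return 0
-- ===== Notes on version B (the rewrite author's own statement) =====
-- stated objective: alternative
-- what changed: Contracts the 0-cost doubling edges into chains followed by direct recursion, turning A's 0-1 BFS over a deque of (node, time) pairs into a plain level-by-level BFS over chain seeds, with a hash set for visited instead of a boolean array and a single level counter instead of per-node times.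
import Mathlib
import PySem

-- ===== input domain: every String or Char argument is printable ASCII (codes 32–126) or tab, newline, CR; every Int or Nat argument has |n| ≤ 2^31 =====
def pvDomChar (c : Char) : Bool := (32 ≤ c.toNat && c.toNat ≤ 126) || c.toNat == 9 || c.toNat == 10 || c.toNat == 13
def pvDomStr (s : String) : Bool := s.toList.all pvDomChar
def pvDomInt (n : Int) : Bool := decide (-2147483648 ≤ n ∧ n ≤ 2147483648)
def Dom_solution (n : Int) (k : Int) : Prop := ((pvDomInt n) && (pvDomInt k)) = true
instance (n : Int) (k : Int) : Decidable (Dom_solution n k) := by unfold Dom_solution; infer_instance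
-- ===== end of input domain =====

-- B contracts the 0-cost doubling edges into recursively followed chains, turning A's
-- 0-1 deque BFS into a plain level-by-level BFS over chain seeds with a hash set for
-- visited (alternative decomposition, same values; no speed claim).

-- ===== PORT A =====
-- Shared literal guard of A's loop body: `0 <= x <= 100000 and not visited[x]`
def okv (x : Int) (vis : Array Bool) : Bool :=
  decide (0 ≤ x) && decide (x ≤ 100000) && !(vis.getD x.toNat false)

-- `visited[x] = True` (the guard ensures the index is in range, so this is exact)
def mark (x : Int) (vis : Array Bool) : Array Bool := vis.setIfInBounds x.toNat true

-- the three guarded pushes of A's loop body (teleport to the deque's front, walks to its back)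
def pushA (c t : Int) (fr bk : List (Int × Int)) (vis : Array Bool) :
    List (Int × Int) × List (Int × Int) × Array Bool :=
  let (fr, vis) := if okv (c * 2) vis then ((c * 2, t) :: fr, mark (c * 2) vis) else (fr, vis)
  let (bk, vis) := if okv (c - 1) vis then ((c - 1, t + 1) :: bk, mark (c - 1) vis) else (bk, vis)
  let (bk, vis) := if okv (c + 1) vis then ((c + 1, t + 1) :: bk, mark (c + 1) vis) else (bk, vis)
  (fr, bk, vis)

-- A's `while dq` loop; the deque is the standard two-list queue: `front`, then `back` reversed
-- (popleft = head of front, else head of back.reverse; appendleft = cons front; append = cons back).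
-- Fuel 200000 exceeds the possible number of pops (every pushed node is marked visited at push
-- time, so at most 100002 pops ever happen); the fuel-0 branch returns A's loop-exhausted 0
-- and is never reached with this fuel.
def solLoopA (fuel : Nat) (front back : List (Int × Int)) (vis : Array Bool) (k : Int) : Int :=
  match fuel with
  | 0 => 0
  | fuel + 1 =>
    match (match front with
           | p :: f => some (p, f, back)
           | [] =>
             match back.reverse with
             | [] => none
             | p :: f => some (p, f, ([] : List (Int × Int)))) with
    | none => 0
    | some ((c, t), fr, bk) =>
      if c = k then t
      else
        let (fr, bk, vis) := pushA c t fr bk vis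
        solLoopA fuel fr bk vis k

def solution (n : Int) (k : Int) : Int :=
  solLoopA 200000 [(n, 0)] [] (Array.replicate 100001 false) k

-- ===== PORT B =====
-- B's guard `0 <= x <= 100000 and x not in visited` on the hash set
def chk (x : Int) (vis : Std.HashSet Int) : Bool :=
  decide (0 ≤ x) && decide (x ≤ 100000) && !(vis.contains x)

-- the marking part of B's `visit` body: the chain test for x*2 and the two ±1 neighbours
-- (appended to nxt; Python appends right, this conses — nxt is reversed on level promotion)
def stepB (x : Int) (nxt : List Int) (vis : Std.HashSet Int) :
    Bool × List Int × Std.HashSet Int :=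
  let d := x * 2
  let chain := chk d vis
  let vis := if chain then vis.insert d else vis
  let (nxt, vis) := if chk (x - 1) vis then ((x - 1) :: nxt, vis.insert (x - 1)) else (nxt, vis)
  let (nxt, vis) := if chk (x + 1) vis then ((x + 1) :: nxt, vis.insert (x + 1)) else (nxt, vis)
  (chain, nxt, vis)

-- B's recursive `visit`: explore x and its free-doubling chain; returns
-- (found k?, nxt, visited, fuel left).  Fuel only for termination; one unit per node,
-- like A's loop (the 0 branch is unreachable with the initial 200000).
def visitB (fuel : Nat) (x : Int) (nxt : List Int) (vis : Std.HashSet Int) (k : Int) :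
    Bool × List Int × Std.HashSet Int × Nat :=
  match fuel with
  | 0 => (false, nxt, vis, 0)
  | fuel + 1 =>
    if x = k then (true, nxt, vis, fuel)
    else
      match stepB x nxt vis with
      | (chain, nxt, vis) =>
        if chain then visitB fuel (x * 2) nxt vis k else (false, nxt, vis, fuel)

-- B's `for x in level: if visit(x, nxt): return t` loop over one level's seeds
def seedsB (fuel : Nat) (seeds : List Int) (nxt : List Int) (vis : Std.HashSet Int) (k : Int) :
    Bool × List Int × Std.HashSet Int × Nat :=
  match seeds with
  | [] => (false, nxt, vis, fuel)
  | x :: rest =>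
    match visitB fuel x nxt vis k with
    | (true, nxt, vis, f) => (true, nxt, vis, f)
    | (false, nxt, vis, f) => seedsB f rest nxt vis k

-- B's `while level` loop; when the remaining fuel did not decrease (only possible at fuel 0)
-- the loop returns the exhausted 0, like A's fuel-0 branch
def levelsB (fuel : Nat) (level : List Int) (t : Int) (vis : Std.HashSet Int) (k : Int) : Int :=
  match level with
  | [] => 0
  | x :: rest =>
    match seedsB fuel (x :: rest) [] vis k with
    | (true, _, _, _) => t
    | (false, nxt, vis, f) =>
      if h : f < fuel then levelsB f nxt.reverse (t + 1) vis k else 0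
termination_by fuel
decreasing_by exact h

def solution_alt (n : Int) (k : Int) : Int :=
  levelsB 200000 [n] 0 (∅ : Std.HashSet Int) k

-- ===== PRECONDITION & SPEC =====
def Spec_solution (n : Int) (k : Int) (out : Int) : Prop := out = solution_alt n k
instance (n : Int) (k : Int) (out : Int) : Decidable (Spec_solution n k out) := by unfold Spec_solution; infer_instance

-- ===== CLAIM (what is proved, stated in full; the proofs are below) =====
def Claim_equal_solution : Prop := ∀ (n : Int) (k : Int), Dom_solution n k → Spec_solution n k (solution n k)

-- ===== LEMMAS AND PROOFS =====

-- A's visited list and B's visited set agree on the whole board [0, 100000]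
def Rvis (visA : Array Bool) (s : Std.HashSet Int) : Prop :=
  visA.size = 100001 ∧
  ∀ i : Int, 0 ≤ i → i ≤ 100000 → visA.getD i.toNat false = s.contains i

-- the rest of B's computation from a mid-level state (proof-only bookkeeping)
def runB (fuel : Nat) (seeds : List Int) (t : Int) (nxt : List Int) (vis : Std.HashSet Int) (k : Int) : Int :=
  match seedsB fuel seeds nxt vis k with
  | (true, _, _, _) => t
  | (false, nxt', vis', f) => levelsB f nxt'.reverse (t + 1) vis' k

theorem gstep (x : Int) (visA : Array Bool) (s : Std.HashSet Int) (h : Rvis visA s) :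
    okv x visA = chk x s ∧ (chk x s = true → Rvis (mark x visA) (s.insert x)) := by
  obtain ⟨hlen, hlook⟩ := h
  constructor
  · by_cases h0 : (0 : Int) ≤ x
    · by_cases h1 : x ≤ 100000
      · simp only [okv, chk, hlook x h0 h1]
      · simp [okv, chk, h1]
    · simp [okv, chk, h0]
  · intro hc
    have hc' : (0 ≤ x ∧ x ≤ 100000) ∧ s.contains x = false := by
      simpa [chk, Bool.and_eq_true, Bool.not_eq_true'] using hc
    obtain ⟨⟨h0, h1⟩, _⟩ := hc'
    constructor
    · simp [mark, Array.size_setIfInBounds, hlen]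
    · intro i hi0 hi1
      have hilt : i.toNat < visA.size := by omega
      rw [Std.HashSet.contains_insert]
      by_cases hix : i = x
      · subst hix
        simp [mark, Array.getD_eq_getD_getElem?, Array.getElem?_setIfInBounds, hilt]
      · have hne : x.toNat ≠ i.toNat := by omega
        have hxi : (x == i) = false := by
          simp only [beq_eq_false_iff_ne, ne_eq]
          exact fun he => hix he.symm
        rw [← hlook i hi0 hi1, hxi]
        simp [mark, Array.getD_eq_getD_getElem?, Array.getElem?_setIfInBounds, hne]

theorem push_sim (c t : Int) (fr bk : List (Int × Int)) (visA : Array Bool) (s : Std.HashSet Int)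
    (rest nxt : List Int) (h : Rvis visA s)
    (hq : fr ++ bk.reverse = rest.map (fun x => (x, t)) ++ nxt.reverse.map (fun x => (x, t + 1))) :
    Rvis (pushA c t fr bk visA).2.2 (stepB c nxt s).2.2 ∧
    (pushA c t fr bk visA).1 ++ (pushA c t fr bk visA).2.1.reverse
      = (if (stepB c nxt s).1 then [(c * 2, t)] else []) ++ rest.map (fun x => (x, t))
        ++ (stepB c nxt s).2.1.reverse.map (fun x => (x, t + 1)) := by
  obtain ⟨e1, m1⟩ := gstep (c * 2) visA s h
  by_cases h1 : chk (c * 2) s = true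
  · have hR1 := m1 h1
    obtain ⟨e2, m2⟩ := gstep (c - 1) (mark (c * 2) visA) (s.insert (c * 2)) hR1
    by_cases h2 : chk (c - 1) (s.insert (c * 2)) = true
    · have hR2 := m2 h2
      obtain ⟨e3, m3⟩ := gstep (c + 1) _ _ hR2
      by_cases h3 : chk (c + 1) ((s.insert (c * 2)).insert (c - 1)) = true
      · refine ⟨?_, ?_⟩
        · simp only [pushA, stepB, e1, e2, e3, h1, h2, h3, eq_self_iff_true, if_true, if_false,
            ite_true, ite_false, Bool.false_eq_true, not_false_iff]
          exact m3 h3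
        · simp [pushA, stepB, e1, e2, e3, h1, h2, h3, hq, List.map_append, ← List.append_assoc]
      · refine ⟨?_, ?_⟩
        · simp only [pushA, stepB, e1, e2, e3, h1, h2, h3, eq_self_iff_true, if_true, if_false,
            ite_true, ite_false, Bool.false_eq_true, not_false_iff]
          exact hR2
        · simp [pushA, stepB, e1, e2, e3, h1, h2, h3, hq, List.map_append, ← List.append_assoc]

    · obtain ⟨e3, m3⟩ := gstep (c + 1) _ _ hR1
      by_cases h3 : chk (c + 1) (s.insert (c * 2)) = true
      · refine ⟨?_, ?_⟩
        · simp only [pushA, stepB, e1, e2, e3, h1, h2, h3, eq_self_iff_true, if_true, if_false,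
            ite_true, ite_false, Bool.false_eq_true, not_false_iff]
          exact m3 h3
        · simp [pushA, stepB, e1, e2, e3, h1, h2, h3, hq, List.map_append, ← List.append_assoc]
      · refine ⟨?_, ?_⟩
        · simp only [pushA, stepB, e1, e2, e3, h1, h2, h3, eq_self_iff_true, if_true, if_false,
            ite_true, ite_false, Bool.false_eq_true, not_false_iff]
          exact hR1
        · simp [pushA, stepB, e1, e2, e3, h1, h2, h3, hq, List.map_append, ← List.append_assoc]

  · have hR1 := h
    obtain ⟨e2, m2⟩ := gstep (c - 1) visA s hR1
    by_cases h2 : chk (c - 1) s = true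
    · have hR2 := m2 h2
      obtain ⟨e3, m3⟩ := gstep (c + 1) _ _ hR2
      by_cases h3 : chk (c + 1) (s.insert (c - 1)) = true
      · refine ⟨?_, ?_⟩
        · simp only [pushA, stepB, e1, e2, e3, h1, h2, h3, eq_self_iff_true, if_true, if_false,
            ite_true, ite_false, Bool.false_eq_true, not_false_iff]
          exact m3 h3
        · simp [pushA, stepB, e1, e2, e3, h1, h2, h3, hq, List.map_append, ← List.append_assoc]
      · refine ⟨?_, ?_⟩
        · simp only [pushA, stepB, e1, e2, e3, h1, h2, h3, eq_self_iff_true, if_true, if_false,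
            ite_true, ite_false, Bool.false_eq_true, not_false_iff]
          exact hR2
        · simp [pushA, stepB, e1, e2, e3, h1, h2, h3, hq, List.map_append, ← List.append_assoc]

    · obtain ⟨e3, m3⟩ := gstep (c + 1) _ _ hR1
      by_cases h3 : chk (c + 1) s = true
      · refine ⟨?_, ?_⟩
        · simp only [pushA, stepB, e1, e2, e3, h1, h2, h3, eq_self_iff_true, if_true, if_false,
            ite_true, ite_false, Bool.false_eq_true, not_false_iff]
          exact m3 h3
        · simp [pushA, stepB, e1, e2, e3, h1, h2, h3, hq, List.map_append, ← List.append_assoc]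
      · refine ⟨?_, ?_⟩
        · simp only [pushA, stepB, e1, e2, e3, h1, h2, h3, eq_self_iff_true, if_true, if_false,
            ite_true, ite_false, Bool.false_eq_true, not_false_iff]
          exact hR1
        · simp [pushA, stepB, e1, e2, e3, h1, h2, h3, hq, List.map_append, ← List.append_assoc]


theorem seedsB_zero (seeds : List Int) (nxt : List Int) (vis : Std.HashSet Int) (k : Int) :
    seedsB 0 seeds nxt vis k = (false, nxt, vis, 0) := by
  induction seeds generalizing nxt vis with
  | nil => rfl
  | cons x rest ih => simp only [seedsB, visitB]; exact ih nxt vis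

theorem levelsB_zero (level : List Int) (t : Int) (vis : Std.HashSet Int) (k : Int) :
    levelsB 0 level t vis k = 0 := by
  cases level with
  | nil => rw [levelsB]
  | cons x rest => rw [levelsB, seedsB_zero]; simp

theorem visitB_le (fuel : Nat) (x : Int) (nxt : List Int) (vis : Std.HashSet Int) (k : Int) :
    (visitB fuel x nxt vis k).2.2.2 ≤ fuel - 1 := by
  induction fuel generalizing x nxt vis with
  | zero => simp [visitB]
  | succ fuel ih =>
    rw [visitB]
    split
    · simp
    · rcases h : stepB x nxt vis with ⟨chain, nxt', vis'⟩
      by_cases hc : chain = true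
      · simpa [hc] using le_trans (ih (x * 2) nxt' vis') (Nat.sub_le _ _)
      · simp [hc]

theorem seedsB_le (seeds : List Int) (fuel : Nat) (nxt : List Int) (vis : Std.HashSet Int) (k : Int) :
    (seedsB fuel seeds nxt vis k).2.2.2 ≤ fuel := by
  induction seeds generalizing fuel nxt vis with
  | nil => simp [seedsB]
  | cons x rest ih =>
    rw [seedsB]
    rcases h : visitB fuel x nxt vis k with ⟨found, nxt', vis', f⟩
    have hf : f ≤ fuel := by
      have := visitB_le fuel x nxt vis k
      rw [h] at this
      simp only [] at this
      omega
    cases found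
    · exact le_trans (ih f nxt' vis') hf
    · simpa using hf

theorem seedsB_cons_lt (fuel : Nat) (x : Int) (rest nxt : List Int) (vis : Std.HashSet Int) (k : Int)
    (hf : 0 < fuel) : (seedsB fuel (x :: rest) nxt vis k).2.2.2 < fuel := by
  rw [seedsB]
  rcases h : visitB fuel x nxt vis k with ⟨found, nxt', vis', f⟩
  have hfl : f < fuel := by
    have := visitB_le fuel x nxt vis k
    rw [h] at this
    simp only [] at this
    omega
  cases found
  · exact lt_of_le_of_lt (seedsB_le rest f nxt' vis' k) hfl
  · simpa using hfl

-- unfolding `levelsB` on a nonempty level gives `runB` (the fuel guard collapses)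
theorem levelsB_ne (fuel : Nat) (x : Int) (rest : List Int) (t : Int) (vis : Std.HashSet Int) (k : Int) :
    levelsB fuel (x :: rest) t vis k = runB fuel (x :: rest) t [] vis k := by
  rcases Nat.eq_zero_or_pos fuel with rfl | hf
  · rw [levelsB_zero, runB, seedsB_zero]
    simp [levelsB_zero]
  · rw [levelsB, runB]
    rcases hz : seedsB fuel (x :: rest) [] vis k with ⟨found, nxt', vis', f⟩
    cases found
    · have hlt : f < fuel := by
        have := seedsB_cons_lt fuel x rest [] vis k hf
        rw [hz] at this
        simpa using this
      simp [hlt]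
    · rfl

-- one B-step on the head seed (x ≠ k): the chain either prepends x*2 to the seeds or not
theorem runB_cons (fuel : Nat) (x : Int) (rest : List Int) (t : Int) (nxt : List Int)
    (vis : Std.HashSet Int) (k : Int) (hx : x ≠ k) :
    runB (fuel + 1) (x :: rest) t nxt vis k
      = runB fuel ((if (stepB x nxt vis).1 then [x * 2] else []) ++ rest) t
          (stepB x nxt vis).2.1 (stepB x nxt vis).2.2 k := by
  rcases h : stepB x nxt vis with ⟨chain, nxt', vis'⟩
  cases chain
  · simp only [runB, seedsB, visitB, if_neg hx, h, List.nil_append, Bool.false_eq_true,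
      if_false]
  · simp only [runB, seedsB, visitB, if_neg hx, h, List.singleton_append, if_true]

theorem runB_cons_found (fuel : Nat) (rest : List Int) (t : Int) (nxt : List Int)
    (vis : Std.HashSet Int) (k : Int) :
    runB (fuel + 1) (k :: rest) t nxt vis k = t := by
  simp [runB, seedsB, visitB]

-- The master bisimulation statement: A's flattened deque = remaining seeds at time t, then
-- the collected next level at time t+1; visited boards related by Rvis.
def MS (fuel : Nat) : Prop :=
  ∀ (seeds : List Int) (t : Int) (nxt : List Int) (fr bk : List (Int × Int))
    (visA : Array Bool) (s : Std.HashSet Int) (k : Int),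
    fr ++ bk.reverse = seeds.map (fun x => (x, t)) ++ nxt.reverse.map (fun x => (x, t + 1)) →
    Rvis visA s →
    solLoopA fuel fr bk visA k = runB fuel seeds t nxt s k

-- one pop of A against one `visit` call of B
theorem pop_step (fuel : Nat) (ih : MS fuel)
    (x t : Int) (rest nxt : List Int) (f bk : List (Int × Int)) (visA : Array Bool)
    (s : Std.HashSet Int) (k : Int)
    (hq : f ++ bk.reverse = rest.map (fun y => (y, t)) ++ nxt.reverse.map (fun y => (y, t + 1)))
    (hR : Rvis visA s) :
    (if x = k then t
     else
       let (fr2, bk2, vis2) := pushA x t f bk visA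
       solLoopA fuel fr2 bk2 vis2 k)
    = runB (fuel + 1) (x :: rest) t nxt s k := by
  by_cases hx : x = k
  · subst hx
    rw [runB_cons_found]
    simp
  · rw [runB_cons fuel x rest t nxt s k hx, if_neg hx]
    obtain ⟨hR', hq'⟩ := push_sim x t f bk visA s rest nxt hR hq
    rcases hA : pushA x t f bk visA with ⟨fr2, bk2, vis2⟩
    rcases hB : stepB x nxt s with ⟨chain, nxt2, s2⟩
    rw [hA, hB] at hR' hq'
    simp only [hA, hB]
    apply ih ((if chain then [x * 2] else []) ++ rest) t nxt2 fr2 bk2 vis2 s2 k ?_ hR'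
    rw [List.map_append]
    have hmap : (if chain then [x * 2] else []).map (fun y => (y, t))
        = (if chain then [(x * 2, t)] else []) := by
      cases chain <;> simp
    rw [hmap, List.append_assoc]
    simpa using hq'

-- A's pop (front, else reversed back) against the head seed of B's current level
theorem master_pop (fuel : Nat) (ih : MS fuel)
    (x : Int) (rest : List Int) (t : Int) (nxt : List Int) (fr bk : List (Int × Int))
    (visA : Array Bool) (s : Std.HashSet Int) (k : Int)
    (hq : fr ++ bk.reverse
      = (x :: rest).map (fun y => (y, t)) ++ nxt.reverse.map (fun y => (y, t + 1)))
    (hR : Rvis visA s) :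
    solLoopA (fuel + 1) fr bk visA k = runB (fuel + 1) (x :: rest) t nxt s k := by
  cases fr with
  | cons p f =>
    simp only [List.map_cons, List.cons_append] at hq
    injection hq with hp htail
    subst hp
    simp only [solLoopA]
    exact pop_step fuel ih x t rest nxt f bk visA s k htail hR
  | nil =>
    simp only [List.nil_append, List.map_cons, List.cons_append] at hq
    rcases hbr : bk.reverse with _ | ⟨p, f'⟩
    · rw [hbr] at hq; cases hq
    · rw [hbr] at hq
      injection hq with hp htail
      subst hp
      simp only [solLoopA, hbr]
      exact pop_step fuel ih x t rest nxt f' [] visA s k (by simpa using htail) hR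

theorem master : ∀ fuel : Nat, MS fuel := by
  intro fuel
  induction fuel using Nat.strong_induction_on with
  | _ fuel ih =>
    intro seeds t nxt fr bk visA s k hq hR
    cases fuel with
    | zero => simp [solLoopA, runB, seedsB_zero, levelsB_zero]
    | succ fuel =>
      have ihM : MS fuel := ih fuel (Nat.lt_succ_self _)
      cases seeds with
      | cons x rest => exact master_pop fuel ihM x rest t nxt fr bk visA s k hq hR
      | nil =>
        simp only [List.map_nil, List.nil_append] at hq
        have hrB : runB (fuel + 1) ([] : List Int) t nxt s k
            = levelsB (fuel + 1) nxt.reverse (t + 1) s k := by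
          simp only [runB, seedsB]
        rw [hrB]
        rcases hnx : nxt.reverse with _ | ⟨y, ys⟩
        · rw [hnx] at hq
          simp only [List.map_nil] at hq
          obtain ⟨rfl, hbk⟩ := List.append_eq_nil_iff.mp hq
          rw [levelsB]
          simp [solLoopA, hbk]
        · rw [levelsB_ne]
          exact master_pop fuel ihM y ys (t + 1) [] fr bk visA s k (by rw [hq, hnx]; simp) hR

-- the initial states are related
theorem init_Rvis : Rvis (Array.replicate 100001 false) (∅ : Std.HashSet Int) := by
  constructor
  · simp
  · intro i h0 h1
    have hlt : i.toNat < 100001 := by omega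
    simp [Array.getD_eq_getD_getElem?, hlt]

-- ===== VERDICT (by name: the statement is the Claim_ definition above) =====
theorem solution_spec : Claim_equal_solution := by
  intro n k _
  unfold Spec_solution solution solution_alt
  rw [levelsB_ne]
  exact master 200000 [n] 0 [] [(n, 0)] [] (Array.replicate 100001 false) (∅ : Std.HashSet Int) k
    (by simp) init_Rvis
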